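-- pv_equiv track=rewrite | github.com/akaky30/ljg-firstre | app.py | pick_exact_pid_from_ps
-- ===== SOURCE A (Python) =====
-- def pick_exact_pid_from_ps(ps_output: str, target_app: str):
--     """
--     从 frida-ps -Uai 的输出里，尽量选主进程 PID：
--     - 优先匹配整行末尾恰好是 target_app 的行（避免 :push / :remote）
--     - 再退而求其次匹配“最后一列等于 target_app”的行
--     返回 int 或 None
--     """
--     best = None
--     for ln in (ps_output or "").splitlines():
--         s = ln.strip()
--         if not s:
--             continue
--         parts = s.split()
--         # 先判定是否匹配“恰好就是包名（无冒号后缀）”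
--         if s.endswith(" " + target_app) or s.endswith("\t" + target_app) or (len(parts) >= 2 and parts[-1] == target_app):
--             # 抓第一个纯数字 token 当 PID
--             for tok in parts:
--                 if tok.isdigit():
--                     return int(tok)
--
--         # 记录一个退路：包含 target_app 但不是严格等于（比如 :remote），仅在完全找不到时用
--         if target_app in s and best is None:
--             for tok in parts:
--                 if tok.isdigit():
--                     best = int(tok)
--                     break
--     return best
-- ===== SOURCE B (Python) =====
-- def pick_exact_pid_from_ps(ps_output: str, target_app: str):
--     """Two-pass re-implementation: scan once for exact-match lines (line ends
--     with the bare app name), then once for lines merely containing it; in each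
--     pass return the first digit token of the first matching line that has one."""
--     def first_pid(parts):
--         return next((int(t) for t in parts if t.isdigit()), None)
--
--     def is_exact(s, parts):
--         return (s.endswith(" " + target_app) or s.endswith("\t" + target_app)
--                 or (len(parts) >= 2 and parts[-1] == target_app))
--
--     stripped = [ln.strip() for ln in (ps_output or "").splitlines()]
--     rows = [(s, s.split()) for s in stripped if s]
--     for matches in (is_exact, lambda s, parts: target_app in s):
--         for s, parts in rows:
--             if matches(s, parts):
--                 pid = first_pid(parts)
--                 if pid is not None:
--                     return pid
--     return None
-- ===== Notes on version B (the rewrite author's own statement) =====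
-- stated objective: simpler
-- what changed: Replaces the single loop carrying a 'best' fallback accumulator by two independent priority passes over a precomputed (stripped line, tokens) table: pass 1 returns the first exact-match line's first digit token, pass 2 the first merely-containing line's.
import Mathlib
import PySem

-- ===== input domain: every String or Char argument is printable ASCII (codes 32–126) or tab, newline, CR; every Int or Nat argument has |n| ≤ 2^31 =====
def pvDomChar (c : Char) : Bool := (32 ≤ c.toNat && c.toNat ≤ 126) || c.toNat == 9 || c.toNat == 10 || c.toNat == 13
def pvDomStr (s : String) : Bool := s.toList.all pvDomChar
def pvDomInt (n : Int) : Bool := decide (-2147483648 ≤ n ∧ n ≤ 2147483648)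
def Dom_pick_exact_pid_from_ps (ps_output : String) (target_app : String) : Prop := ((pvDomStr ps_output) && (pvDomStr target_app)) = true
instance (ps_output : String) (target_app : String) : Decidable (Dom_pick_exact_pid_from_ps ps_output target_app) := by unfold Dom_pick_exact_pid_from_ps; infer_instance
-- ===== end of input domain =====

-- B replaces A's single loop with a 'best' fallback accumulator by two independent
-- priority passes over a precomputed (stripped line, tokens) table (objective: simpler).

-- ===== PORT A =====
-- 'for tok in parts: if tok.isdigit(): return int(tok)' (falls through with none)
def pvAScanPid : List String → Option Int
  | [] => none
  | t :: rest =>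
    if PySem.Str.strIsdigit t then some ((PySem.Int.ofStr? t).getD 0) else pvAScanPid rest

-- the fallback inner loop: first digit token sets best and breaks, else best unchanged
def pvASetBest (best : Option Int) : List String → Option Int
  | [] => best
  | t :: rest =>
    if PySem.Str.strIsdigit t then some ((PySem.Int.ofStr? t).getD 0) else pvASetBest best rest

def pvAExact (target : String) (s : String) (parts : List String) : Bool :=
  PySem.Str.endswith s (" " ++ target) || PySem.Str.endswith s ("\t" ++ target) ||
    (decide (2 ≤ parts.length) && (PySem.List.pyGet? parts (-1) == some target))

def pvALoop (target : String) (best : Option Int) : List String → Option Int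
  | [] => best
  | ln :: rest =>
    let s := PySem.Str.strip ln
    if s = "" then pvALoop target best rest
    else
      let parts := PySem.Str.split₀ s
      match (if pvAExact target s parts then pvAScanPid parts else none) with
      | some v => some v
      | none =>
        let best' := if PySem.Str.isIn target s && best.isNone then pvASetBest best parts else best
        pvALoop target best' rest

def pick_exact_pid_from_ps (ps_output : String) (target_app : String) : Option Int :=
  pvALoop target_app none (PySem.Str.splitlines ps_output)

-- ===== PORT B =====
-- first_pid: first digit token of the row, if any
def pvBFirstPid : List String → Option Int
  | [] => none
  | t :: rest =>
    if PySem.Str.strIsdigit t then some ((PySem.Int.ofStr? t).getD 0) else pvBFirstPid rest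

def pvBExact (target : String) (s : String) (parts : List String) : Bool :=
  PySem.Str.endswith s (" " ++ target) || PySem.Str.endswith s ("\t" ++ target) ||
    (decide (2 ≤ parts.length) && (PySem.List.pyGet? parts (-1) == some target))

-- the (stripped line, tokens) table built from the line list
def pvBRowsOf (lines : List String) : List (String × List String) :=
  ((lines.map PySem.Str.strip).filter (fun s => s != "")).map (fun s => (s, PySem.Str.split₀ s))

-- one pass: first matching row that yields a pid
def pvBScan (p : String → List String → Bool) : List (String × List String) → Option Int
  | [] => none
  | (s, parts) :: rest =>
    if p s parts then
      match pvBFirstPid parts with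
      | some v => some v
      | none => pvBScan p rest
    else pvBScan p rest

def pick_exact_pid_from_ps_alt (ps_output : String) (target_app : String) : Option Int :=
  let rows := pvBRowsOf (PySem.Str.splitlines ps_output)
  match pvBScan (pvBExact target_app) rows with
  | some v => some v
  | none => pvBScan (fun s _ => PySem.Str.isIn target_app s) rows

-- ===== PRECONDITION & SPEC =====
def Spec_pick_exact_pid_from_ps (ps_output : String) (target_app : String) (out : Option Int) : Prop := out = pick_exact_pid_from_ps_alt ps_output target_app
instance (ps_output : String) (target_app : String) (out : Option Int) : Decidable (Spec_pick_exact_pid_from_ps ps_output target_app out) := by unfold Spec_pick_exact_pid_from_ps; infer_instance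

-- ===== CLAIM (what is proved, stated in full; the proofs are below) =====
def Claim_equal_pick_exact_pid_from_ps : Prop := ∀ (ps_output : String) (target_app : String), Dom_pick_exact_pid_from_ps ps_output target_app → Spec_pick_exact_pid_from_ps ps_output target_app (pick_exact_pid_from_ps ps_output target_app)

-- ===== LEMMAS AND PROOFS =====

theorem pvAScanPid_eq_firstPid (parts : List String) : pvAScanPid parts = pvBFirstPid parts := by
  induction parts with
  | nil => rfl
  | cons t rest ih => simp [pvAScanPid, pvBFirstPid, ih]

theorem pvASetBest_eq (best : Option Int) (parts : List String) :
    pvASetBest best parts = (pvBFirstPid parts).or best := by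
  induction parts with
  | nil => rfl
  | cons t rest ih =>
    simp only [pvASetBest, pvBFirstPid]
    split <;> simp [ih]

set_option maxHeartbeats 1000000 in
-- the key invariant: A's loop = exact pass, else best, else containing pass
theorem pvALoop_eq (target : String) (best : Option Int) (lines : List String) :
    pvALoop target best lines =
      ((pvBScan (pvBExact target) (pvBRowsOf lines)).or
        (best.or (pvBScan (fun s _ => PySem.Str.isIn target s) (pvBRowsOf lines)))) := by
  induction lines generalizing best with
  | nil => simp [pvALoop, pvBRowsOf, pvBScan]
  | cons ln rest ih =>
    by_cases hs : PySem.Str.strip ln = ""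
    · simpa [pvALoop, pvBRowsOf, hs, List.filter] using ih best
    · have hrows : pvBRowsOf (ln :: rest) =
          (PySem.Str.strip ln, PySem.Str.split₀ (PySem.Str.strip ln)) :: pvBRowsOf rest := by
        simp [pvBRowsOf, hs]
      rw [show pvALoop target best (ln :: rest) =
          (let s := PySem.Str.strip ln;
           if s = "" then pvALoop target best rest
           else
             let parts := PySem.Str.split₀ s
             match (if pvAExact target s parts then pvAScanPid parts else none) with
             | some v => some v
             | none =>
               let best' := if PySem.Str.isIn target s && best.isNone
                            then pvASetBest best parts else best
               pvALoop target best' rest) from rfl]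
      simp only [hs, if_false, hrows]
      set s := PySem.Str.strip ln with hsdef
      set parts := PySem.Str.split₀ s with hp
      have hax : pvAExact target s parts = pvBExact target s parts := rfl
      by_cases he : pvBExact target s parts = true
      · -- exact line
        rw [hax]
        simp only [he, if_true, pvAScanPid_eq_firstPid, pvBScan, if_true]
        cases hfp : pvBFirstPid parts with
        | some v => simp
        | none =>
          -- falls through; fallback update
          simp only [pvASetBest_eq, hfp, Option.none_or]
          by_cases hc : PySem.Str.isIn target s = true
          · simp only [hc, Bool.true_and]
            cases best with
            | none => simpa using ih none
            | some b => simpa using ih (some b)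
          · simp only [Bool.not_eq_true] at hc
            simp [ih best]
      · -- not exact
        rw [hax]
        simp only [Bool.not_eq_true] at he
        simp only [he, Bool.false_eq_true, if_false, pvBScan]
        by_cases hc : PySem.Str.isIn target s = true
        · simp only [hc, Bool.true_and, pvASetBest_eq]
          cases best with
          | none =>
            simp only [Option.isNone_none, if_true, Option.or_none]
            cases hfp : pvBFirstPid parts with
            | some v => simp [ih]
            | none => simpa [hfp] using ih none
          | some b => simp [ih]
        · simp only [Bool.not_eq_true] at hc
          have hc' : PySem.Chars.isIn target.toList s.toList = false := hc
          simp [hc', ih best]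

-- ===== VERDICT (by name: the statement is the Claim_ definition above) =====
theorem pick_exact_pid_from_ps_spec : Claim_equal_pick_exact_pid_from_ps := by
  intro ps target _
  show pick_exact_pid_from_ps ps target = pick_exact_pid_from_ps_alt ps target
  unfold pick_exact_pid_from_ps pick_exact_pid_from_ps_alt
  rw [pvALoop_eq]
  cases h : pvBScan (pvBExact target) (pvBRowsOf (PySem.Str.splitlines ps)) <;> simp [h]
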